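-- pv_equiv track=rewrite | github.com/monitor640/ethereum-phishing | temporal.py | find_least_frequent_6_consecutive
-- ===== SOURCE A (Python) =====
-- def find_least_frequent_6_consecutive(hours):
--     from collections import Counter
--
--     hour_counts = Counter(hours)
--
--     min_count = float('inf')
--     best_window = None
--
--     for start_hour in range(24):
--         consecutive_hours = [(start_hour + i) % 24 for i in range(7)]
--         total_count = sum(hour_counts.get(h, 0) for h in consecutive_hours)
--
--         if total_count < min_count:
--             min_count = total_count
--             best_window = consecutive_hours
--
--     return best_window, min_count
-- ===== SOURCE B (Python) =====
-- def find_least_frequent_6_consecutive(hours):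
--     from collections import Counter
--
--     hour_counts = Counter(hours)
--     counts = [hour_counts.get(h, 0) for h in range(24)]
--
--     total = sum(counts[:7])
--     best_start, min_count = 0, total
--     for start in range(1, 24):
--         total += counts[(start + 6) % 24] - counts[start - 1]
--         if total < min_count:
--             best_start, min_count = start, total
--
--     return [(best_start + i) % 24 for i in range(7)], min_count
-- ===== Notes on version B (the rewrite author's own statement) =====
-- stated objective: alternative
-- what changed: Replaces recomputing each 7-hour window sum from the Counter by a 24-entry count array plus a sliding-window update (add the entering hour, subtract the leaving one), tracking the best start index with strict '<' so the earliest start still wins ties.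
import Mathlib
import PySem

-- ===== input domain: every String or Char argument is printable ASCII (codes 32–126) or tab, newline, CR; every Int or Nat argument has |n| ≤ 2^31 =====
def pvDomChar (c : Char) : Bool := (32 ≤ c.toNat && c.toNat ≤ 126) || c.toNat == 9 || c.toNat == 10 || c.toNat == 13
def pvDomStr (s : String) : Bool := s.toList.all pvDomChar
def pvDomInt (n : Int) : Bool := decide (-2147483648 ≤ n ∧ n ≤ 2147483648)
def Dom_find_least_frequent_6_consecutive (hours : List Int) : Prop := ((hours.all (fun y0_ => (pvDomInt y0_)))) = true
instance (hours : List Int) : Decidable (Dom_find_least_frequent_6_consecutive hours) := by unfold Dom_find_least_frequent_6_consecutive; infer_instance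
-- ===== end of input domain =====

-- B replaces A's per-window 7-term Counter sum by a 24-entry count array with a sliding-window update (objective: alternative algorithm, same overall cost).


-- ===== PORT A =====
-- literal port of A: Counter, then for each of the 24 start hours recompute the 7-term
-- window sum; min_count = float('inf') / best_window = None are the `none` states.
-- pvAStep is the body of A's `for start_hour in range(24)` loop.
def pvAStep (hour_counts : PySem.Dict Int Int) (st : Option Int × Option (List Int))
    (start_hour : Int) : Option Int × Option (List Int) :=
  let consecutive_hours := (PySem.List.pyRange 0 7 1).map (fun i => PySem.Int.mod (start_hour + i) 24)
  let total_count := (consecutive_hours.map (fun h => hour_counts.getD h 0)).sum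
  if (match st.1 with | none => true | some m => total_count < m) then
    (some total_count, some consecutive_hours)
  else st

def find_least_frequent_6_consecutive (hours : List Int) : List Int × Int :=
  let hour_counts := PySem.Dict.counter hours
  let res := (PySem.List.pyRange 0 24 1).foldl (pvAStep hour_counts) (none, none)
  (res.2.getD [], res.1.getD 0)

-- ===== PORT B =====
-- literal port of B: count array counts[0..23], initial window sum, then slide.
-- pvBStep is the body of B's `for start in range(1, 24)` loop.
def pvBStep (counts : List Int) (st : Int × Int × Int) (start : Int) : Int × Int × Int :=
  let total := st.1 + PySem.List.pyGetD counts (PySem.Int.mod (start + 6) 24) 0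
                    - PySem.List.pyGetD counts (start - 1) 0
  if total < st.2.2 then (total, start, total) else (total, st.2.1, st.2.2)

def find_least_frequent_6_consecutive_alt (hours : List Int) : List Int × Int :=
  let hour_counts := PySem.Dict.counter hours
  let counts := (PySem.List.pyRange 0 24 1).map (fun h => hour_counts.getD h 0)
  let total0 := (PySem.List.slice counts none (some 7)).sum
  let res := (PySem.List.pyRange 1 24 1).foldl (pvBStep counts) (total0, (0, total0))
  ((PySem.List.pyRange 0 7 1).map (fun i => PySem.Int.mod (res.2.1 + i) 24), res.2.2)

-- ===== PRECONDITION & SPEC =====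
def Spec_find_least_frequent_6_consecutive (hours : List Int) (out : List Int × Int) : Prop := out = find_least_frequent_6_consecutive_alt hours
instance (hours : List Int) (out : List Int × Int) : Decidable (Spec_find_least_frequent_6_consecutive hours out) := by unfold Spec_find_least_frequent_6_consecutive; infer_instance

-- ===== CLAIM (what is proved, stated in full; the proofs are below) =====
def Claim_equal_find_least_frequent_6_consecutive : Prop := ∀ (hours : List Int), Dom_find_least_frequent_6_consecutive hours → Spec_find_least_frequent_6_consecutive hours (find_least_frequent_6_consecutive hours)

-- ===== LEMMAS AND PROOFS =====

-- the 7-term window sum starting at hour s, and the window itself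
def pvW (c : Int → Int) (s : Int) : Int :=
  c (PySem.Int.mod s 24) + c (PySem.Int.mod (s+1) 24) + c (PySem.Int.mod (s+2) 24) +
  c (PySem.Int.mod (s+3) 24) + c (PySem.Int.mod (s+4) 24) + c (PySem.Int.mod (s+5) 24) +
  c (PySem.Int.mod (s+6) 24)

def pvWin (s : Int) : List Int := (PySem.List.pyRange 0 7 1).map (fun i => PySem.Int.mod (s + i) 24)

-- A's and B's loop bodies with the count lookups abstracted into c
def pvStepA (c : Int → Int) (st : Option Int × Option (List Int)) (s : Int) : Option Int × Option (List Int) :=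
  if (match st.1 with | none => true | some m => ((pvWin s).map c).sum < m) then
    (some ((pvWin s).map c).sum, some (pvWin s))
  else st

def pvStepB (c : Int → Int) (st : Int × Int × Int) (s : Int) : Int × Int × Int :=
  let total := st.1 + c (PySem.Int.mod (s + 6) 24) - c (s - 1)
  if total < st.2.2 then (total, s, total) else (total, st.2.1, st.2.2)

lemma pvWin_sum (c : Int → Int) (s : Int) : ((pvWin s).map c).sum = pvW c s := by
  simp [pvWin, pvW, show PySem.List.pyRange 0 7 1 = [0,1,2,3,4,5,6] from rfl]
  ring

lemma pvMod_small (s : Int) (h0 : 0 ≤ s) (h1 : s < 24) : PySem.Int.mod s 24 = s := by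
  rw [PySem.Int.mod_eq_emod_of_pos (by norm_num)]
  exact Int.emod_eq_of_lt h0 h1

lemma pvSlide (c : Int → Int) (s : Int) (h0 : 1 ≤ s) (h1 : s ≤ 23) :
    pvW c (s-1) + c (PySem.Int.mod (s + 6) 24) - c (s - 1) = pvW c s := by
  have hm : PySem.Int.mod (s-1) 24 = s - 1 := pvMod_small _ (by omega) (by omega)
  simp only [pvW, hm]
  ring_nf

-- the two loops stay in lock step: after hours 0..k, B's running total is pvW c k
-- and both sides agree on (best, min)
lemma pvLoop (c : Int → Int) : ∀ k : Nat, k ≤ 23 →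
    ∃ b m, (PySem.List.pyRange 1 (1 + (k:Int)) 1).foldl (pvStepB c) (pvW c 0, (0, pvW c 0))
             = (pvW c k, (b, m))
      ∧ (PySem.List.pyRange 0 (1 + (k:Int)) 1).foldl (pvStepA c) (none, none)
             = (some m, some (pvWin b)) := by
  intro k hk
  induction k with
  | zero =>
    refine ⟨0, pvW c 0, ?_, ?_⟩
    · rw [show (1 + ((0:Nat):Int)) = 1 from by norm_num,
         show PySem.List.pyRange 1 1 1 = ([] : List Int) from rfl]
      simp
    · rw [show (1 + ((0:Nat):Int)) = 1 from by norm_num,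
         show PySem.List.pyRange 0 1 1 = [(0:Int)] from rfl]
      simp [pvStepA, pvWin_sum]
  | succ k ih =>
    obtain ⟨b, m, hB, hA⟩ := ih (by omega)
    have hcast : (((k+1:Nat)):Int) = (k:Int) + 1 := by push_cast; ring
    have hBr : PySem.List.pyRange 1 (1 + ((k+1:Nat):Int)) 1
        = PySem.List.pyRange 1 (1 + (k:Int)) 1 ++ [1 + (k:Int)] := by
      rw [hcast, show (1 : Int) + ((k:Int)+1) = (1 + (k:Int)) + 1 from by ring]
      exact PySem.List.pyRange_one_succ_right (by omega)
    have hAr : PySem.List.pyRange 0 (1 + ((k+1:Nat):Int)) 1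
        = PySem.List.pyRange 0 (1 + (k:Int)) 1 ++ [1 + (k:Int)] := by
      rw [hcast, show (1 : Int) + ((k:Int)+1) = (1 + (k:Int)) + 1 from by ring]
      exact PySem.List.pyRange_one_succ_right (by omega)
    have hk23 : ((k:Int)+1) ≤ 23 := by exact_mod_cast hk
    have htot : pvW c k + c (PySem.Int.mod ((1 + (k:Int)) + 6) 24) - c ((1 + (k:Int)) - 1)
        = pvW c ((k:Int)+1) := by
      have hsl := pvSlide c ((k:Int)+1) (by omega) hk23
      have h1 : (k:Int)+1-1 = (k:Int) := by ring
      rw [h1] at hsl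
      rw [show (1 + (k:Int)) + 6 = ((k:Int)+1) + 6 from by ring,
          show (1 + (k:Int)) - 1 = (k:Int) from by ring]
      exact hsl
    have hstepB : pvStepB c (pvW c k, (b, m)) (1 + (k:Int))
        = (pvW c ((k:Int)+1),
            if pvW c ((k:Int)+1) < m then (1 + (k:Int), pvW c ((k:Int)+1)) else (b, m)) := by
      simp only [pvStepB, htot]
      by_cases hlt : pvW c ((k:Int)+1) < m
      · rw [if_pos hlt, if_pos hlt]
      · rw [if_neg hlt, if_neg hlt]
    have hstepA : pvStepA c (some m, some (pvWin b)) (1 + (k:Int))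
        = if pvW c ((k:Int)+1) < m
          then (some (pvW c ((k:Int)+1)), some (pvWin (1 + (k:Int))))
          else (some m, some (pvWin b)) := by
      simp only [pvStepA, pvWin_sum, show (1:Int) + (k:Int) = (k:Int)+1 from by ring]
      by_cases hlt : pvW c ((k:Int)+1) < m
      · simp [hlt]
      · simp [hlt]
    by_cases hlt : pvW c ((k:Int)+1) < m
    · refine ⟨1 + (k:Int), pvW c ((k:Int)+1), ?_, ?_⟩
      · rw [hBr, List.foldl_append, hB, List.foldl_cons, List.foldl_nil, hstepB,
            if_pos hlt, hcast]
      · rw [hAr, List.foldl_append, hA, List.foldl_cons, List.foldl_nil, hstepA,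
            if_pos hlt]
    · refine ⟨b, m, ?_, ?_⟩
      · rw [hBr, List.foldl_append, hB, List.foldl_cons, List.foldl_nil, hstepB,
            if_neg hlt, hcast]
      · rw [hAr, List.foldl_append, hA, List.foldl_cons, List.foldl_nil, hstepA,
            if_neg hlt]

-- B's loop body over counts = [c 0, …, c 23] is pvStepB c on every visited start hour
lemma pvBfold (c : Int → Int) (init : Int × Int × Int) :
    (PySem.List.pyRange 1 24 1).foldl (pvBStep ((PySem.List.pyRange 0 24 1).map c)) init
      = (PySem.List.pyRange 1 24 1).foldl (pvStepB c) init := by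
  apply PySem.List.foldl_congr_mem
  intro st s hs
  have hmem := (PySem.List.mem_pyRange_one).1 hs
  have h6 : PySem.Int.mod (s + 6) 24 < 24 := PySem.Int.mod_lt (s+6) (by norm_num)
  have h6' : 0 ≤ PySem.Int.mod (s + 6) 24 := PySem.Int.mod_nonneg (s+6) (by norm_num)
  simp only [pvBStep, pvStepB,
    PySem.List.pyGetD_map_pyRange_of_nonneg c 24 _ 0 h6' h6,
    PySem.List.pyGetD_map_pyRange_of_nonneg c 24 (s-1) 0 (by omega) (by omega)]

-- the initial window sum counts[:7] is pvW c 0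
lemma pvTot0 (c : Int → Int) :
    (PySem.List.slice ((PySem.List.pyRange 0 24 1).map c) none (some 7)).sum = pvW c 0 := by
  rw [show ((PySem.List.pyRange 0 24 1).map c) = [c 0, c 1, c 2, c 3, c 4, c 5, c 6, c 7, c 8,
    c 9, c 10, c 11, c 12, c 13, c 14, c 15, c 16, c 17, c 18, c 19, c 20, c 21, c 22, c 23] from by
      simp [show PySem.List.pyRange 0 24 1 =
        [0,1,2,3,4,5,6,7,8,9,10,11,12,13,14,15,16,17,18,19,20,21,22,23] from rfl]]
  rw [PySem.List.slice_to _ (show (0:Int) ≤ 7 from by norm_num)]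
  simp [pvW]
  ring

-- both port bodies, as a function of the abstract count lookup c
lemma pvPorts (c : Int → Int) :
    (let res := (PySem.List.pyRange 0 24 1).foldl (pvStepA c) (none, none)
     (res.2.getD ([] : List Int), res.1.getD 0))
    = (let counts := (PySem.List.pyRange 0 24 1).map c
       let total0 := (PySem.List.slice counts none (some 7)).sum
       let res := (PySem.List.pyRange 1 24 1).foldl (pvBStep counts) (total0, (0, total0))
       ((PySem.List.pyRange 0 7 1).map (fun i => PySem.Int.mod (res.2.1 + i) 24), res.2.2)) := by
  simp only [pvBfold, pvTot0]
  obtain ⟨b, m, hB, hA⟩ := pvLoop c 23 (by norm_num)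
  rw [show (1 : Int) + ((23:Nat):Int) = 24 from by norm_num] at hB hA
  rw [hB, hA]
  simp [pvWin]

-- ===== VERDICT (by name: the statement is the Claim_ definition above) =====
theorem find_least_frequent_6_consecutive_spec : Claim_equal_find_least_frequent_6_consecutive := by
  intro hours _
  unfold Spec_find_least_frequent_6_consecutive
  exact pvPorts (fun h => (PySem.Dict.counter hours).getD h 0)
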